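-- pv_equiv track=rewrite | github.com/DanielBacci/algorithms | array/max_combination/solution.py | max_combination
-- ===== SOURCE A (Python) =====
-- def max_combination(nums):
--     max_amount = 0
--     loop_amount = 0
--     negative_index = None
--     index = 0
--
--     while index < len(nums):
--         if nums[index] >= 0:
--             loop_amount += nums[index]
--             max_amount = max(max_amount, loop_amount)
--             index += 1
--
--         elif negative_index is None:
--             loop_amount += nums[index]
--             max_amount = max(max_amount, loop_amount)
--             negative_index = index
--             index += 1
--
--         else:
--             loop_amount = 0
--             index = negative_index + 1
--             negative_index = None
--
--     return max_amount
-- ===== SOURCE B (Python) =====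
-- def max_combination(nums):
--     mx = 0
--     s0 = 0  # sum of the window containing no negative (since just after the last negative)
--     s1 = 0  # sum of the window containing at most one negative (since just after the second-to-last negative)
--     for x in nums:
--         if x >= 0:
--             s0 += x
--             s1 += x
--             mx = max(mx, s1)
--         else:
--             mx = max(mx, s0)
--             s1 = s0 + x
--             s0 = 0
--     return mx
-- ===== Notes on version B (the rewrite author's own statement) =====
-- stated objective: faster
-- what changed: A's while loop with a backward index jump (re-scanning the elements after the previous negative whenever a second negative is hit) is replaced by a single forward fold that keeps two running window sums (one with no negative, one with at most one negative) and a running maximum.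
import Mathlib
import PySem

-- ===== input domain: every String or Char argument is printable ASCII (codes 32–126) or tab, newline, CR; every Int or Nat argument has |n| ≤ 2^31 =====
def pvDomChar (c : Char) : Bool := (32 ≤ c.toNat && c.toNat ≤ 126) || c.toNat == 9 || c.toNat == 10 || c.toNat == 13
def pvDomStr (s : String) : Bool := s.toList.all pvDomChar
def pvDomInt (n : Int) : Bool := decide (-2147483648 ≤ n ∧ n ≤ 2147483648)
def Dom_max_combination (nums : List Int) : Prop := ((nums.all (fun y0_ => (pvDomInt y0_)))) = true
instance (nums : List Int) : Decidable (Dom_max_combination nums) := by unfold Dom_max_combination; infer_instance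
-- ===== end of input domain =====

-- B replaces A's backward index-jump rescan by a single forward fold keeping two window
-- sums (at most one / no negative), which is simpler; return values proved equal.

-- ===== PORT A =====
-- A's while loop revisits, after each reset, only the all-nonnegative gap behind the last
-- negative, so it makes at most 2*len(nums)+1 iterations; the fuel guard below only makes
-- this computation total (the lemmas prove this fuel is never exhausted).
def maxCombLoop (nums : List Int) (fuel : Nat) (max_amount loop_amount : Int)
    (negative_index : Option Int) (index : Int) : Int :=
  match fuel with
  | 0 => max_amount            -- fuel guard only; unreachable from max_combination
  | fuel + 1 =>
    if index < (nums.length : Int) then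
      match PySem.List.pyGet? nums index with
      | none => max_amount     -- unreachable: 0 ≤ index < len(nums) throughout
      | some x =>
        if 0 ≤ x then
          maxCombLoop nums fuel (max max_amount (loop_amount + x)) (loop_amount + x)
            negative_index (index + 1)
        else
          match negative_index with
          | none =>
            maxCombLoop nums fuel (max max_amount (loop_amount + x)) (loop_amount + x)
              (some index) (index + 1)
          | some j => maxCombLoop nums fuel max_amount 0 none (j + 1)
    else max_amount

def max_combination (nums : List Int) : Int :=
  maxCombLoop nums (2 * nums.length + 1) 0 0 none 0

-- ===== PORT B =====
-- state (mx, s0, s1): mx = running maximum, s0 = sum of the window with no negative,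
-- s1 = sum of the window with at most one negative
def bStep (st : Int × Int × Int) (x : Int) : Int × Int × Int :=
  if 0 ≤ x then (max st.1 (st.2.2 + x), st.2.1 + x, st.2.2 + x)
  else (max st.1 st.2.1, 0, st.2.1 + x)

def max_combination_alt (nums : List Int) : Int :=
  (nums.foldl bStep (0, 0, 0)).1

-- ===== PRECONDITION & SPEC =====
def Spec_max_combination (nums : List Int) (out : Int) : Prop := out = max_combination_alt nums
instance (nums : List Int) (out : Int) : Decidable (Spec_max_combination nums out) := by unfold Spec_max_combination; infer_instance

-- ===== CLAIM (what is proved, stated in full; the proofs are below) =====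
def Claim_equal_max_combination : Prop := ∀ (nums : List Int), Dom_max_combination nums → Spec_max_combination nums (max_combination nums)

-- ===== LEMMAS AND PROOFS =====

-- sum of the segment nums[k : k+m]
def seg (nums : List Int) (k m : Nat) : Int := ((nums.drop k).take m).sum

lemma seg_zero (nums : List Int) (k : Nat) : seg nums k 0 = 0 := by
  simp [seg]

lemma seg_succ_left (nums : List Int) (k m : Nat) (h : k < nums.length) :
    seg nums k (m + 1) = nums[k] + seg nums (k + 1) m := by
  unfold seg
  rw [List.drop_eq_getElem_cons h, List.take_succ_cons, List.sum_cons]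

lemma seg_nonneg (nums : List Int) : ∀ (m k : Nat), k + m ≤ nums.length →
    (∀ t, k ≤ t → t < k + m → 0 ≤ nums.getD t 0) → 0 ≤ seg nums k m := by
  intro m
  induction m with
  | zero => intro k _ _; simp [seg_zero]
  | succ m ih =>
    intro k hk hnn
    have hklen : k < nums.length := by omega
    rw [seg_succ_left nums k m hklen]
    have h1 : 0 ≤ nums[k] := by
      have := hnn k (le_refl _) (by omega)
      rwa [List.getD_eq_getElem _ _ hklen] at this
    have h2 : 0 ≤ seg nums (k + 1) m := by
      apply ih (k + 1) (by omega)
      intro t ht1 ht2; exact hnn t (by omega) (by omega)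
    omega

lemma seg_succ_right (nums : List Int) : ∀ (m k : Nat), k + m < nums.length →
    seg nums k (m + 1) = seg nums k m + nums.getD (k + m) 0 := by
  intro m
  induction m with
  | zero =>
    intro k hk
    simp only [Nat.add_zero]
    rw [seg_succ_left nums k 0 (by omega), seg_zero, seg_zero,
      List.getD_eq_getElem _ _ (by omega)]
    omega
  | succ m ih =>
    intro k hk
    have hklen : k < nums.length := by omega
    rw [seg_succ_left nums k (m + 1) hklen, seg_succ_left nums k m hklen,
      ih (k + 1) (by omega)]
    have : k + 1 + m = k + (m + 1) := by omega
    rw [this]; ring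

-- fast-forward A's loop through an all-nonnegative segment in the "no pending negative" state
lemma rescan (nums : List Int) : ∀ (m k fuel : Nat) (ma la : Int),
    k + m ≤ nums.length →
    (∀ t, k ≤ t → t < k + m → 0 ≤ nums.getD t 0) →
    la ≤ ma →
    maxCombLoop nums (m + fuel) ma la none (k : Int)
      = maxCombLoop nums fuel (max ma (la + seg nums k m)) (la + seg nums k m) none ((k + m : Nat) : Int) := by
  intro m
  induction m with
  | zero =>
    intro k fuel ma la _ _ hla
    rw [seg_zero]
    have h1 : max ma (la + 0) = ma := by omega
    have h2 : la + 0 = la := by omega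
    rw [h1, h2]
    norm_num
  | succ m ih =>
    intro k fuel ma la hk hnn hla
    have hklen : k < nums.length := by omega
    have hx : 0 ≤ nums[k] := by
      have := hnn k (le_refl _) (by omega)
      rwa [List.getD_eq_getElem _ _ hklen] at this
    have hstep : maxCombLoop nums (m + 1 + fuel) ma la none (k : Int)
        = maxCombLoop nums (m + fuel) (max ma (la + nums[k])) (la + nums[k]) none ((k : Int) + 1) := by
      have hfe : m + 1 + fuel = (m + fuel) + 1 := by omega
      rw [hfe]
      simp only [maxCombLoop]
      rw [if_pos (by exact_mod_cast hklen)]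
      rw [PySem.List.pyGet?_natCast, List.getElem?_eq_getElem hklen]
      simp only [if_pos hx]
    rw [hstep]
    have hcast : ((k : Int) + 1) = ((k + 1 : Nat) : Int) := by push_cast; ring
    rw [hcast]
    rw [ih (k + 1) fuel (max ma (la + nums[k])) (la + nums[k]) (by omega)
      (fun t ht1 ht2 => hnn t (by omega) (by omega)) (le_max_right _ _)]
    have hsegnn : 0 ≤ seg nums (k + 1) m := by
      apply seg_nonneg nums m (k + 1) (by omega)
      intro t ht1 ht2; exact hnn t (by omega) (by omega)
    have hseg : seg nums k (m + 1) = nums[k] + seg nums (k + 1) m := seg_succ_left nums k m hklen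
    have hidx : k + 1 + m = k + (m + 1) := by omega
    rw [hidx]
    have e1 : la + nums[k] + seg nums (k + 1) m = la + seg nums k (m + 1) := by rw [hseg]; ring
    have e2 : max (max ma (la + nums[k])) (la + nums[k] + seg nums (k + 1) m)
        = max ma (la + seg nums k (m + 1)) := by
      rw [hseg]
      have : la + nums[k] ≤ la + (nums[k] + seg nums (k + 1) m) := by omega
      omega
    rw [e2, e1]

-- the "pending negative at j" state of A agrees with B's fold, provided the gap
-- nums[j+1 : i] is all-nonnegative and B's s0 is its sum
lemma dirty (nums : List Int) : ∀ (n : Nat), ∀ (i j fuel : Nat) (ma la : Int),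
    i ≤ nums.length → n = nums.length - i → j < i →
    2 * nums.length - i - j ≤ fuel →
    0 ≤ ma →
    (∀ k, j < k → k < i → 0 ≤ nums.getD k 0) →
    maxCombLoop nums fuel ma la (some (j : Int)) (i : Int)
      = (List.foldl bStep (ma, seg nums (j + 1) (i - 1 - j), la) (nums.drop i)).1 := by
  intro n
  induction n with
  | zero =>
    intro i j fuel ma la hi hn hj hfuel hma hgap
    have hieq : i = nums.length := by omega
    obtain ⟨f, rfl⟩ : ∃ f, fuel = f + 1 := ⟨fuel - 1, by omega⟩
    simp only [maxCombLoop]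
    rw [if_neg (by exact_mod_cast (by omega : ¬ i < nums.length))]
    rw [hieq, List.drop_length]
    simp [List.foldl]
  | succ n ih =>
    intro i j fuel ma la hi hn hj hfuel hma hgap
    have hilen : i < nums.length := by omega
    obtain ⟨f, rfl⟩ : ∃ f, fuel = f + 1 := ⟨fuel - 1, by omega⟩
    simp only [maxCombLoop]
    rw [if_pos (by exact_mod_cast hilen)]
    rw [PySem.List.pyGet?_natCast, List.getElem?_eq_getElem hilen]
    have hdrop : nums.drop i = nums[i] :: nums.drop (i + 1) := List.drop_eq_getElem_cons hilen
    by_cases hx : 0 ≤ nums[i]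
    · simp only [if_pos hx]
      have hcast : ((i : Int) + 1) = ((i + 1 : Nat) : Int) := by push_cast; ring
      rw [hcast]
      rw [ih (i + 1) j f (max ma (la + nums[i])) (la + nums[i]) (by omega) (by omega)
        (by omega) (by omega) (le_trans hma (le_max_left _ _))
        (by
          intro k hk1 hk2
          by_cases hki : k = i
          · subst hki; rwa [List.getD_eq_getElem _ _ hilen]
          · exact hgap k hk1 (by omega))]
      rw [hdrop]
      simp only [List.foldl_cons]
      have hb : bStep (ma, seg nums (j + 1) (i - 1 - j), la) nums[i]
          = (max ma (la + nums[i]), seg nums (j + 1) (i + 1 - 1 - j), la + nums[i]) := by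
        simp only [bStep, if_pos hx]
        have h1 : i + 1 - 1 - j = (i - 1 - j) + 1 := by omega
        rw [h1, seg_succ_right nums (i - 1 - j) (j + 1) (by omega)]
        have h2 : j + 1 + (i - 1 - j) = i := by omega
        rw [h2, List.getD_eq_getElem _ _ hilen]
      rw [hb]
    · simp only [if_neg hx]
      -- reset: jump back to j+1, rescan the nonnegative gap, then nums[i] becomes
      -- the first negative of the new run
      have hcast : ((j : Int) + 1) = ((j + 1 : Nat) : Int) := by push_cast; ring
      rw [hcast]
      have hm : (i - 1 - j) + (f - (i - 1 - j)) = f := by omega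
      rw [← hm]
      rw [rescan nums (i - 1 - j) (j + 1) (f - (i - 1 - j)) ma 0 (by omega)
        (fun t ht1 ht2 => hgap t (by omega) (by omega)) hma]
      set S := seg nums (j + 1) (i - 1 - j) with hS
      have hki : j + 1 + (i - 1 - j) = i := by omega
      rw [hki]
      obtain ⟨f', hf'⟩ : ∃ f', f - (i - 1 - j) = f' + 1 := ⟨f - (i - 1 - j) - 1, by omega⟩
      rw [hf']
      simp only [maxCombLoop]
      rw [if_pos (by exact_mod_cast hilen)]
      rw [PySem.List.pyGet?_natCast, List.getElem?_eq_getElem hilen]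
      simp only [if_neg hx]
      have hcast2 : ((i : Int) + 1) = ((i + 1 : Nat) : Int) := by push_cast; ring
      rw [hcast2]
      rw [ih (i + 1) i f' (max (max ma (0 + S)) (0 + S + nums[i])) (0 + S + nums[i])
        (by omega) (by omega) (by omega) (by omega)
        (le_trans hma (le_trans (le_max_left _ _) (le_max_left _ _)))
        (by intro k hk1 hk2; omega)]
      have hmax : max (max ma (0 + S)) (0 + S + nums[i]) = max ma S := by omega
      rw [hmax]
      rw [hdrop]
      simp only [List.foldl_cons]
      have hb : bStep (ma, S, la) nums[i] = (max ma S, 0, S + nums[i]) := by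
        simp only [bStep, if_neg hx]
      rw [hb]
      have hseg0 : seg nums (i + 1) (i + 1 - 1 - i) = 0 := by
        have : i + 1 - 1 - i = 0 := by omega
        rw [this, seg_zero]
      rw [hseg0]
      have he : 0 + S + nums[i] = S + nums[i] := by ring
      rw [he]

-- the "no pending negative" state of A agrees with B's fold when s0 = s1 = la ≤ mx
lemma clean (nums : List Int) : ∀ (n : Nat), ∀ (i fuel : Nat) (ma la : Int),
    i ≤ nums.length → n = nums.length - i →
    2 * (nums.length - i) + 1 ≤ fuel →
    0 ≤ ma → la ≤ ma →
    maxCombLoop nums fuel ma la none (i : Int)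
      = (List.foldl bStep (ma, la, la) (nums.drop i)).1 := by
  intro n
  induction n with
  | zero =>
    intro i fuel ma la hi hn hfuel _ _
    have hieq : i = nums.length := by omega
    obtain ⟨f, rfl⟩ : ∃ f, fuel = f + 1 := ⟨fuel - 1, by omega⟩
    simp only [maxCombLoop]
    rw [if_neg (by exact_mod_cast (by omega : ¬ i < nums.length))]
    rw [hieq, List.drop_length]
    simp [List.foldl]
  | succ n ih =>
    intro i fuel ma la hi hn hfuel hma hla
    have hilen : i < nums.length := by omega
    obtain ⟨f, rfl⟩ : ∃ f, fuel = f + 1 := ⟨fuel - 1, by omega⟩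
    simp only [maxCombLoop]
    rw [if_pos (by exact_mod_cast hilen)]
    rw [PySem.List.pyGet?_natCast, List.getElem?_eq_getElem hilen]
    have hdrop : nums.drop i = nums[i] :: nums.drop (i + 1) := List.drop_eq_getElem_cons hilen
    have hcast : ((i : Int) + 1) = ((i + 1 : Nat) : Int) := by push_cast; ring
    by_cases hx : 0 ≤ nums[i]
    · simp only [if_pos hx]
      rw [hcast]
      rw [ih (i + 1) f (max ma (la + nums[i])) (la + nums[i]) (by omega) (by omega)
        (by omega) (le_trans hma (le_max_left _ _)) (le_max_right _ _)]
      rw [hdrop]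
      simp only [List.foldl_cons]
      have hb : bStep (ma, la, la) nums[i]
          = (max ma (la + nums[i]), la + nums[i], la + nums[i]) := by
        simp only [bStep, if_pos hx]
      rw [hb]
    · simp only [if_neg hx]
      rw [hcast]
      rw [dirty nums (nums.length - (i + 1)) (i + 1) i f (max ma (la + nums[i]))
        (la + nums[i]) (by omega) (by omega) (by omega) (by omega)
        (le_trans hma (le_max_left _ _)) (by intro k hk1 hk2; omega)]
      have hmax : max ma (la + nums[i]) = ma := by omega
      have hseg0 : seg nums (i + 1) (i + 1 - 1 - i) = 0 := by
        have : i + 1 - 1 - i = 0 := by omega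
        rw [this, seg_zero]
      rw [hmax, hseg0, hdrop]
      simp only [List.foldl_cons]
      have hb : bStep (ma, la, la) nums[i] = (max ma la, 0, la + nums[i]) := by
        simp only [bStep, if_neg hx]
      have hmax2 : max ma la = ma := by omega
      rw [hb, hmax2]

-- ===== VERDICT (by name: the statement is the Claim_ definition above) =====
theorem max_combination_spec : Claim_equal_max_combination := by
  intro nums _
  show max_combination nums = max_combination_alt nums
  unfold max_combination max_combination_alt
  have h := clean nums nums.length 0 (2 * nums.length + 1) 0 0 (by omega) (by omega)
    (by omega) (by omega) (by omega)
  simpa using h
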